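-- pv_equiv track=rewrite | github.com/suizokukan/hlevel | hlevel.py | getReprArabicNumberFullWidth
-- ===== SOURCE A (Python) =====
-- def getReprArabicNumberFullWidth(number):
--     """
--             HLevel.getReprArabicNumberFullWidth
--
--             number  : (int)
--     """
--     strnumber = str(number)
--
--     res = []
--
--     digit_to_fullwidthdigit = {
--             "-"     : "-",
--             "0"     : "０",
--             "1"     : "１",
--             "2"     : "２",
--             "3"     : "３",
--             "4"     : "４",
--             "5"     : "５",
--             "6"     : "６",
--             "7"     : "７",
--             "8"     : "８",
--             "9"     : "９",
--         }
--
--     for digit in str(strnumber):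
--         res.append( digit_to_fullwidthdigit[digit] )
--
--     return "".join(res)
-- ===== SOURCE B (Python) =====
-- def getReprArabicNumberFullWidth(number):
--     # Purely arithmetic: peel decimal digits off with divmod (no str(), no lookup
--     # table), emit chr(0xFF10 + d) per digit, reverse, prepend ASCII '-' if negative.
--     n = abs(number)
--     digits = []
--     while n:
--         n, d = divmod(n, 10)
--         digits.append(chr(0xFF10 + d))
--     if not digits:
--         digits.append("\uFF10")
--     if number < 0:
--         digits.append("-")
--     return "".join(reversed(digits))
-- ===== Notes on version B (the rewrite author's own statement) =====
-- stated objective: alternative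
-- what changed: Replaces A's str(number) conversion plus per-character dict lookup by a purely numeric algorithm: repeated divmod by 10 extracts the digits least-significant first, each emitted as chr(0xFF10+d), then the list is reversed and an ASCII '-' prepended for negatives; no string of the number and no lookup table exist.
import Mathlib
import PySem

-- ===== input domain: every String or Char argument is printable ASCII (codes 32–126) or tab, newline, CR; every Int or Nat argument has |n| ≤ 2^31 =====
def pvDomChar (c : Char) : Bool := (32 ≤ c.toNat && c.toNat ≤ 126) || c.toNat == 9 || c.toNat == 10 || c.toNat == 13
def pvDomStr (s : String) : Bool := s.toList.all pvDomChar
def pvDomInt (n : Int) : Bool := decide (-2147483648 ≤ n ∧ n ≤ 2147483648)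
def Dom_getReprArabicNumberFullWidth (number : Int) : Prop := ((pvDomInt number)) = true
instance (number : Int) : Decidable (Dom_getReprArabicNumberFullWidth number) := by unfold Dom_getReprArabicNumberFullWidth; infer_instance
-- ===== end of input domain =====

-- B drops str() and the lookup table: it extracts digits arithmetically by repeated
-- divmod 10 (LSB first), emits Char.ofNat (0xFF10 + d), reverses, and prepends '-' (alternative; same cost).

-- ===== PORT A =====
-- A-side helper: the literal digit_to_fullwidthdigit dict
def fwDict : PySem.Dict Char String := PySem.Dict.ofList
  [('-', "-"), ('0', "０"), ('1', "１"), ('2', "２"), ('3', "３"),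
   ('4', "４"), ('5', "５"), ('6', "６"), ('7', "７"), ('8', "８"), ('9', "９")]

def getReprArabicNumberFullWidth (number : Int) : String :=
  let strnumber := PySem.Int.toStr number
  -- d[digit]: every char of str(int) is '-' or a digit, all keys of the dict, so get? is
  -- always some and the KeyError branch (get? = none) is unreachable
  let res := strnumber.toList.foldl (fun r digit => r ++ [(fwDict.get? digit).getD ""]) []
  PySem.Str.join "" res

-- ===== PORT B =====
-- the while loop: append chr(0xFF10 + n % 10), continue with n // 10, until n = 0
def fwLoop (n : Nat) (digits : List Char) : List Char :=
  if h : n = 0 then digits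
  else fwLoop (n / 10) (digits ++ [Char.ofNat (0xFF10 + n % 10)])
  decreasing_by exact Nat.div_lt_self (Nat.pos_of_ne_zero h) (by norm_num)

def getReprArabicNumberFullWidth_alt (number : Int) : String :=
  let n := number.natAbs
  let digits := fwLoop n []
  let digits := if digits = [] then ['０'] else digits
  let digits := if number < 0 then digits ++ ['-'] else digits
  String.ofList digits.reverse

-- ===== PRECONDITION & SPEC =====
def Spec_getReprArabicNumberFullWidth (number : Int) (out : String) : Prop := out = getReprArabicNumberFullWidth_alt number
instance (number : Int) (out : String) : Decidable (Spec_getReprArabicNumberFullWidth number out) := by unfold Spec_getReprArabicNumberFullWidth; infer_instance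

-- ===== CLAIM (what is proved, stated in full; the proofs are below) =====
def Claim_equal_getReprArabicNumberFullWidth : Prop := ∀ (number : Int), Dom_getReprArabicNumberFullWidth number → Spec_getReprArabicNumberFullWidth number (getReprArabicNumberFullWidth number)

-- ===== LEMMAS AND PROOFS =====

-- full-width image of one character (proof-side abbreviation for A's table entries)
def fwChar (c : Char) : Char :=
  if '0' ≤ c ∧ c ≤ '9' then Char.ofNat (c.toNat + 0xFEE0) else c

-- specification list for fwLoop: digits LSB first
def fwLSB (n : Nat) : List Char :=
  if h : n = 0 then []
  else Char.ofNat (0xFF10 + n % 10) :: fwLSB (n / 10)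
  decreasing_by exact Nat.div_lt_self (Nat.pos_of_ne_zero h) (by norm_num)

lemma fwLoop_eq (n : Nat) : ∀ acc, fwLoop n acc = acc ++ fwLSB n := by
  induction n using Nat.strong_induction_on with
  | _ n ih =>
    intro acc
    rw [fwLoop, fwLSB]
    split
    · simp
    · rename_i h
      rw [ih (n / 10) (Nat.div_lt_self (Nat.pos_of_ne_zero h) (by norm_num))]
      simp

lemma digitChar_bounds (m : Nat) (h : m < 10) :
    48 ≤ (Nat.digitChar m).toNat ∧ (Nat.digitChar m).toNat ≤ 57 := by
  interval_cases m <;> decide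

lemma toDigitsCore_chars (f : Nat) : ∀ (n : Nat) (acc : List Char),
    (∀ c ∈ acc, 48 ≤ c.toNat ∧ c.toNat ≤ 57) →
    ∀ c ∈ Nat.toDigitsCore 10 f n acc, 48 ≤ c.toNat ∧ c.toNat ≤ 57 := by
  induction f with
  | zero => intro n acc hacc; simpa [Nat.toDigitsCore] using hacc
  | succ f ih =>
    intro n acc hacc
    simp only [Nat.toDigitsCore]
    split
    · intro c hc
      rcases List.mem_cons.1 hc with rfl | hc
      · exact digitChar_bounds _ (Nat.mod_lt _ (by norm_num))
      · exact hacc _ hc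
    · refine ih _ _ ?_
      intro c hc
      rcases List.mem_cons.1 hc with rfl | hc
      · exact digitChar_bounds _ (Nat.mod_lt _ (by norm_num))
      · exact hacc _ hc

lemma toChars_chars (n : Int) :
    ∀ c ∈ PySem.Int.toChars n, c = '-' ∨ (48 ≤ c.toNat ∧ c.toNat ≤ 57) := by
  intro c hc
  unfold PySem.Int.toChars at hc
  split at hc
  · rcases List.mem_cons.1 hc with rfl | hc
    · exact Or.inl rfl
    · exact Or.inr (toDigitsCore_chars _ _ [] (by simp) c hc)
  · exact Or.inr (toDigitsCore_chars _ _ [] (by simp) c hc)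

lemma point_eq (c : Char) (h : c = '-' ∨ (48 ≤ c.toNat ∧ c.toNat ≤ 57)) :
    (fwDict.get? c).getD "" = String.ofList [fwChar c] := by
  rcases h with rfl | ⟨h1, h2⟩
  · decide
  · have h10 : c.toNat = 48 ∨ c.toNat = 49 ∨ c.toNat = 50 ∨ c.toNat = 51 ∨ c.toNat = 52 ∨
        c.toNat = 53 ∨ c.toNat = 54 ∨ c.toNat = 55 ∨ c.toNat = 56 ∨ c.toNat = 57 := by omega
    rcases h10 with h | h | h | h | h | h | h | h | h | h <;>
      · have : c = Char.ofNat c.toNat := (Char.ofNat_toNat c).symm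
        rw [h] at this
        subst this
        decide

lemma fwChar_digitChar (m : Nat) (h : m < 10) :
    fwChar (Nat.digitChar m) = Char.ofNat (0xFF10 + m) := by
  interval_cases m <;> decide

-- mapping fwChar over toDigitsCore yields the reversed LSB-first full-width digits
lemma map_toDigitsCore (f : Nat) : ∀ (n : Nat) (acc : List Char), n ≠ 0 → n < f →
    List.map fwChar (Nat.toDigitsCore 10 f n acc)
      = (fwLSB n).reverse ++ List.map fwChar acc := by
  induction f with
  | zero => intro n acc h hf; omega
  | succ f ih =>
    intro n acc h hf
    rw [fwLSB]
    simp only [Nat.toDigitsCore, h]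
    have hm : n % 10 < 10 := Nat.mod_lt _ (by norm_num)
    split
    · rename_i hz
      simp [hz, fwLSB, List.map_cons, fwChar_digitChar _ hm]
    · rename_i hz
      rw [ih (n / 10) _ hz (by omega)]
      simp [fwChar_digitChar _ hm]

lemma map_toDigits (n : Nat) (h : n ≠ 0) :
    List.map fwChar (Nat.toDigits 10 n) = (fwLSB n).reverse := by
  have := map_toDigitsCore (n + 1) n [] h (by omega)
  simpa [Nat.toDigits] using this

lemma A_as_map (n : Int) :
    (getReprArabicNumberFullWidth n).toList = List.map fwChar (PySem.Int.toChars n) := by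
  unfold getReprArabicNumberFullWidth
  simp only [PySem.List.foldl_append_singleton_eq_map, List.nil_append, PySem.Str.toList_join]
  have hmap : List.map String.toList
        (List.map (fun digit => (fwDict.get? digit).getD "") (PySem.Int.toStr n).toList)
      = List.map (fun c => [fwChar c]) (PySem.Int.toStr n).toList := by
    rw [List.map_map]
    apply List.map_congr_left
    intro c hc
    have hc' : c ∈ PySem.Int.toChars n := by rwa [PySem.Int.toList_toStr] at hc
    simp [point_eq c (toChars_chars n c hc'), String.toList_ofList]
  rw [hmap]
  have hjoin : PySem.Chars.join "".toList
        (List.map (fun c => [fwChar c]) (PySem.Int.toStr n).toList)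
      = List.map fwChar (PySem.Int.toStr n).toList := by
    have h := PySem.Chars.join_nil_singletons (List.map fwChar (PySem.Int.toStr n).toList)
    simpa [List.map_map] using h
  rw [hjoin, PySem.Int.toList_toStr]

theorem getReprArabicNumberFullWidth_spec : Claim_equal_getReprArabicNumberFullWidth := by
  intro n _
  unfold Spec_getReprArabicNumberFullWidth getReprArabicNumberFullWidth_alt
  rw [← String.toList_inj, A_as_map, String.toList_ofList]
  simp only [fwLoop_eq, List.nil_append]
  unfold PySem.Int.toChars
  have fwdash : fwChar '-' = '-' := by decide
  by_cases h0 : n = 0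
  · subst h0
    have hz : fwLSB 0 = [] := by rw [fwLSB]; simp
    simp [hz]
    decide
  · have hnz' : n.natAbs ≠ 0 := by omega
    have hne : fwLSB n.natAbs ≠ [] := by rw [fwLSB]; simp [hnz']
    by_cases hneg : n < 0
    · simp [hneg, map_toDigits _ hnz', hne, fwdash]
    · have hab : n.toNat = n.natAbs := by omega
      simp [hneg, hab, map_toDigits _ hnz', hne]
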